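-- pv_equiv track=rewrite | github.com/creminem94/advent-of-code | 2025/day7.py | path_discovery
-- ===== SOURCE A (Python) =====
-- def path_discovery(initial_pos, lines, i, side = 'L'):
--     if i >= len(lines):
--         return [[initial_pos]]
--     # path = [initial_pos]
--     sub_paths = []
--     current_pos = initial_pos
--     # for i in range(2, len(lines), 2):
--     line = lines[i]
--     if line[current_pos] == '^':
--         if side == 'L':
--             current_pos -= 1
--         else:
--             current_pos += 1
--         left_paths = path_discovery(current_pos, lines, i+2, 'L')
--         # map each path by prepending current_pos
--         left_paths = map(lambda x: [initial_pos] + x, left_paths)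
--         sub_paths += left_paths
--         right_paths = path_discovery(current_pos, lines, i+2, 'R')
--         right_paths = map(lambda x: [initial_pos] + x, right_paths)
--         sub_paths += right_paths
--     # path.append(current_pos)
--     else:
--         middle_paths = path_discovery(current_pos, lines, i+2, side)
--         middle_paths = map(lambda x: [initial_pos] + x, middle_paths)
--         sub_paths += middle_paths
--
--     return sub_paths
-- ===== SOURCE B (Python) =====
-- def _expand(line, state):
--     pos, prefix, sd = state
--     if line[pos] == '^':
--         npos = pos - 1 if sd == 'L' else pos + 1
--         return [(npos, prefix + [pos], 'L'), (npos, prefix + [pos], 'R')]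
--     return [(pos, prefix + [pos], sd)]
--
-- def path_discovery(initial_pos, lines, i, side='L'):
--     # breadth-first, level by level; ordered expansion keeps A's DFS emission order
--     states = [(initial_pos, [], side)]
--     for j in range(i, len(lines), 2):
--         line = lines[j]
--         states = [child for s in states for child in _expand(line, s)]
--     return [prefix + [pos] for (pos, prefix, _) in states]
-- ===== Notes on version B (the rewrite author's own statement) =====
-- stated objective: alternative
-- what changed: Replaces A's binary recursion (two recursive calls per '^' plus per-level prepending of the head position) by a single breadth-first loop over range(i, len(lines), 2) that carries an ordered list of (position, prefix, side) states and expands each state in order, which reproduces A's DFS emission order.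
import Mathlib
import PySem

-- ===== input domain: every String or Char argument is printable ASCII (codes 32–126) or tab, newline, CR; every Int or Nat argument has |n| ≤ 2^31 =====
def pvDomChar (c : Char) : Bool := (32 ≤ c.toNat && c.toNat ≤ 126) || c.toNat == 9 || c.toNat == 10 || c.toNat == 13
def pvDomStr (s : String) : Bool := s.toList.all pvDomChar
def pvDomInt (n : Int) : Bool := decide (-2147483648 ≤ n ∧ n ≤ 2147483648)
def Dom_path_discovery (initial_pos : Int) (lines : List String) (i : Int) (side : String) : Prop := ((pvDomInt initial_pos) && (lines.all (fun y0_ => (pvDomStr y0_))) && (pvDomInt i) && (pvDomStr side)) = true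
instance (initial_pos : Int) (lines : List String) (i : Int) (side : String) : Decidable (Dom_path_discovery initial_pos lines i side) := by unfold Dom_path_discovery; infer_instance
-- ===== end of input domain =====

-- B replaces A's binary recursion by one breadth-first level loop over range(i, len(lines), 2)
-- carrying the ordered list of (position, prefix, side) states (objective: alternative decomposition;
-- inside Pre_ the '.getD' fallbacks of both ports are never reached).

-- ===== PORT A =====
def path_discovery (initial_pos : Int) (lines : List String) (i : Int) (side : String) : List (List Int) :=
  if _h : (lines.length : Int) ≤ i then [[initial_pos]]
  else
    let line := (PySem.List.pyGet? lines i).getD ""      -- lines[i]; none (IndexError) excluded by Pre_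
    if (PySem.Str.pyGet? line initial_pos).getD ' ' == '^' then   -- line[current_pos]; none excluded by Pre_
      let current_pos := if side == "L" then initial_pos - 1 else initial_pos + 1
      let left_paths := (path_discovery current_pos lines (i + 2) "L").map (fun x => [initial_pos] ++ x)
      let right_paths := (path_discovery current_pos lines (i + 2) "R").map (fun x => [initial_pos] ++ x)
      left_paths ++ right_paths
    else
      (path_discovery initial_pos lines (i + 2) side).map (fun x => [initial_pos] ++ x)
termination_by ((lines.length : Int) - i).toNat
decreasing_by all_goals omega

-- ===== PORT B =====
def pvExpand (line : String) (s : Int × List Int × String) : List (Int × List Int × String) :=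
  let (pos, pref, sd) := s
  if (PySem.Str.pyGet? line pos).getD ' ' == '^' then
    let npos := if sd == "L" then pos - 1 else pos + 1
    [(npos, pref ++ [pos], "L"), (npos, pref ++ [pos], "R")]
  else
    [(pos, pref ++ [pos], sd)]

def path_discovery_alt (initial_pos : Int) (lines : List String) (i : Int) (side : String) : List (List Int) :=
  let final := (PySem.List.pyRange i (lines.length : Int) 2).foldl
    (fun states j => states.flatMap (pvExpand ((PySem.List.pyGet? lines j).getD "")))
    [(initial_pos, ([] : List Int), side)]
  final.map (fun s => s.2.1 ++ [s.1])

-- ===== PRECONDITION & SPEC =====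
-- pvStep: the (position, side) successors of one state at one line, none = IndexError there.
def pvStep (line : String) (s : Int × String) : Option (List (Int × String)) :=
  match PySem.Str.pyGet? line s.1 with
  | none => none
  | some c =>
    if c == '^' then
      let np := if s.2 == "L" then s.1 - 1 else s.1 + 1
      some [(np, "L"), (np, "R")]
    else some [s]

-- pvSafe: no state reachable at the visited lines js ever reads an out-of-range index.
def pvSafe (lines : List String) (js : List Int) (states : List (Int × String)) : Bool :=
  match js with
  | [] => true
  | j :: js' =>
    match PySem.List.pyGet? lines j with
    | none => false
    | some line =>
      match states.mapM (pvStep line) with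
      | none => false
      | some nss => pvSafe lines js' nss.flatten

-- Pre_ holds exactly on the inputs where A returns normally: it excludes precisely the inputs on
-- which A raises IndexError (some actually-reached line or character index is out of range under
-- Python's negative-index rule); no input on which A returns a value is excluded.
def Pre_path_discovery (initial_pos : Int) (lines : List String) (i : Int) (side : String) : Prop :=
  pvSafe lines (PySem.List.pyRange i (lines.length : Int) 2) [(initial_pos, side)] = true
instance (initial_pos : Int) (lines : List String) (i : Int) (side : String) : Decidable (Pre_path_discovery initial_pos lines i side) := by unfold Pre_path_discovery; infer_instance

def pvWitness_path_discovery : Int × List String × Int × String := (0, ["."], 0, "L")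

def Spec_path_discovery (initial_pos : Int) (lines : List String) (i : Int) (side : String) (out : List (List Int)) : Prop := out = path_discovery_alt initial_pos lines i side
instance (initial_pos : Int) (lines : List String) (i : Int) (side : String) (out : List (List Int)) : Decidable (Spec_path_discovery initial_pos lines i side out) := by unfold Spec_path_discovery; infer_instance

-- ===== CLAIM (what is proved, stated in full; the proofs are below) =====
def Claim_equal_path_discovery : Prop := ∀ (initial_pos : Int) (lines : List String) (i : Int) (side : String), Dom_path_discovery initial_pos lines i side → Pre_path_discovery initial_pos lines i side → Spec_path_discovery initial_pos lines i side (path_discovery initial_pos lines i side)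

-- ===== LEMMAS AND PROOFS =====

-- A's recursion re-expressed over the explicit list of visited line indices.
def pvRecA (lines : List String) (p : Int) (js : List Int) (sd : String) : List (List Int) :=
  match js with
  | [] => [[p]]
  | j :: js =>
    let line := (PySem.List.pyGet? lines j).getD ""
    if (PySem.Str.pyGet? line p).getD ' ' == '^' then
      let p' := if sd == "L" then p - 1 else p + 1
      (pvRecA lines p' js "L").map (fun x => [p] ++ x) ++ (pvRecA lines p' js "R").map (fun x => [p] ++ x)
    else
      (pvRecA lines p js sd).map (fun x => [p] ++ x)

theorem pvRange2_cons (a b : Int) (h : a < b) :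
    PySem.List.pyRange a b 2 = a :: PySem.List.pyRange (a + 2) b 2 := by
  rw [PySem.List.pyRange_of_pos a b (by norm_num), PySem.List.pyRange_of_pos (a+2) b (by norm_num)]
  have hn : (if a < b then ((b - a + 2 - 1) / 2).toNat else 0)
      = (if a + 2 < b then ((b - (a + 2) + 2 - 1) / 2).toNat else 0) + 1 := by
    split_ifs <;> omega
  rw [hn, List.range_succ_eq_map]
  simp [List.map_map, Function.comp]
  intro k _
  ring

theorem pvRange2_nil (a b : Int) (h : b ≤ a) : PySem.List.pyRange a b 2 = [] := by
  rw [PySem.List.pyRange_of_pos a b (by norm_num)]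
  simp [show ¬ a < b by omega]

theorem pvA_eq_recA (lines : List String) (p i : Int) (sd : String) :
    path_discovery p lines i sd = pvRecA lines p (PySem.List.pyRange i (lines.length : Int) 2) sd := by
  rw [path_discovery]
  by_cases h : (lines.length : Int) ≤ i
  · rw [dif_pos h, pvRange2_nil _ _ h, pvRecA]
  · rw [dif_neg h, pvRange2_cons _ _ (by omega), pvRecA]
    simp only
    split_ifs with hc hs
    · rw [pvA_eq_recA lines (p - 1) (i + 2) "L", pvA_eq_recA lines (p - 1) (i + 2) "R"]
    · rw [pvA_eq_recA lines (p + 1) (i + 2) "L", pvA_eq_recA lines (p + 1) (i + 2) "R"]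
    · rw [pvA_eq_recA lines p (i + 2) sd]
termination_by ((lines.length : Int) - i).toNat
decreasing_by all_goals omega

theorem pvFoldB (lines : List String) (js : List Int) (states : List (Int × List Int × String)) :
    (js.foldl (fun st j => st.flatMap (pvExpand ((PySem.List.pyGet? lines j).getD ""))) states).map
        (fun s => s.2.1 ++ [s.1]) =
      states.flatMap (fun s => (pvRecA lines s.1 js s.2.2).map (fun x => s.2.1 ++ x)) := by
  induction js generalizing states with
  | nil =>
    simp [pvRecA, List.map_eq_flatMap]
  | cons j js ih =>
    rw [List.foldl_cons, ih, List.flatMap_assoc]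
    congr 1
    funext s
    obtain ⟨pos, pref, sd⟩ := s
    simp only [pvExpand, pvRecA]
    split_ifs with hc <;>
      simp [List.map_map, Function.comp_def]
-- ===== VERDICT (by name: the statement is the Claim_ definition above) =====
theorem path_discovery_spec : Claim_equal_path_discovery := by
  intro initial_pos lines i side _hD _hP
  unfold Spec_path_discovery path_discovery_alt
  rw [pvFoldB, pvA_eq_recA]
  simp
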